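-- pv_equiv track=rewrite | github.com/algocean1204/Auto_Trade_v1 | src/crawler/ai_context_builder.py | _build_insider_section
-- ===== SOURCE A (Python) =====
-- from typing import Any
--
-- def _build_insider_section(items: list[dict[str, Any]]) -> str:
--     """[INSIDER ALERT] 섹션을 생성한다."""
--     lines = ["[INSIDER ALERT]"]
--
--     # 거래 유형별 집계
--     sells: list[dict[str, Any]] = []
--     buys: list[dict[str, Any]] = []
--
--     for item in items:
--         meta = item.get("metadata", {})
--         tx_type = meta.get("transaction_type", "").lower()
--         if "sale" in tx_type or "sell" in tx_type:
--             sells.append(meta)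
--         elif "buy" in tx_type or "purchase" in tx_type:
--             buys.append(meta)
--
--     lines.append(
--         f"Total: {len(items)} trades "
--         f"(Sells: {len(sells)}, Buys: {len(buys)})"
--     )
--
--     if sells:
--         lines.append("Significant Sales:")
--         # 티커별 매도 집계
--         sells_by_ticker: dict[str, int] = {}
--         for s in sells:
--             ticker = s.get("ticker", "?")
--             sells_by_ticker[ticker] = sells_by_ticker.get(ticker, 0) + 1
--         for ticker, count in sorted(
--             sells_by_ticker.items(), key=lambda x: x[1], reverse=True
--         ):
--             lines.append(f"  - {ticker}: {count} sell transaction(s)")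
--
--     if buys:
--         lines.append("Notable Buys:")
--         buys_by_ticker: dict[str, int] = {}
--         for b in buys:
--             ticker = b.get("ticker", "?")
--             buys_by_ticker[ticker] = buys_by_ticker.get(ticker, 0) + 1
--         for ticker, count in sorted(
--             buys_by_ticker.items(), key=lambda x: x[1], reverse=True
--         ):
--             lines.append(f"  - {ticker}: {count} buy transaction(s)")
--
--     return "\n".join(lines)
-- ===== SOURCE B (Python) =====
-- from typing import Any
--
-- def _build_insider_section(items: list[dict[str, Any]]) -> str:
--     """[INSIDER ALERT] section, built in a single classifying pass."""
--     sell_counts: dict[str, int] = {}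
--     buy_counts: dict[str, int] = {}
--     n_sells = 0
--     n_buys = 0
--
--     for item in items:
--         meta = item.get("metadata", {})
--         tx = meta.get("transaction_type", "").lower()
--         if "sale" in tx or "sell" in tx:
--             t = meta.get("ticker", "?")
--             sell_counts[t] = sell_counts.get(t, 0) + 1
--             n_sells += 1
--         elif "buy" in tx or "purchase" in tx:
--             t = meta.get("ticker", "?")
--             buy_counts[t] = buy_counts.get(t, 0) + 1
--             n_buys += 1
--
--     lines = [
--         "[INSIDER ALERT]",
--         f"Total: {len(items)} trades (Sells: {n_sells}, Buys: {n_buys})",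
--     ]
--     for header, word, counts in (
--         ("Significant Sales:", "sell", sell_counts),
--         ("Notable Buys:", "buy", buy_counts),
--     ):
--         if counts:
--             lines.append(header)
--             for ticker, count in sorted(
--                 counts.items(), key=lambda x: x[1], reverse=True
--             ):
--                 lines.append(f"  - {ticker}: {count} {word} transaction(s)")
--     return "\n".join(lines)
-- ===== Notes on version B (the rewrite author's own statement) =====
-- stated objective: simpler
-- what changed: B replaces A's two-phase pipeline (collect sells/buys metadata lists, then re-scan each list to build its per-ticker dict) with a single classifying pass that increments the per-ticker counters and the two running totals directly, and emits both sections through one shared section loop instead of A's duplicated sell/buy blocks.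
import Mathlib
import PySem

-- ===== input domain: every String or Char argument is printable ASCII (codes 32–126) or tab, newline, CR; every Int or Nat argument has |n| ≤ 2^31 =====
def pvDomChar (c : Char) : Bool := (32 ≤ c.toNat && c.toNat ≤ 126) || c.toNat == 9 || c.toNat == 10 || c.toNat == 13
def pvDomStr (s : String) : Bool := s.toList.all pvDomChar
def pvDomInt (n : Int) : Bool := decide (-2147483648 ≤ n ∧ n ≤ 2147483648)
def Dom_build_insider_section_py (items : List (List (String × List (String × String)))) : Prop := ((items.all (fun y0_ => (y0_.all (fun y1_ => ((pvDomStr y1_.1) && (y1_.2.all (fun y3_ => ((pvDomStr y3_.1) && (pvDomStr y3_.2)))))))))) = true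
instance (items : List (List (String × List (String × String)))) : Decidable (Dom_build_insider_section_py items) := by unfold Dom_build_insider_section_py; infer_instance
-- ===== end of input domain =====

-- B is a simpler decomposition: one classifying pass that increments its per-ticker
-- counters and running totals directly, and one shared section emitter used for both
-- sections, instead of A's intermediate sells/buys lists re-scanned per section.

-- shared helpers (identical Python expressions in both programs)
def pvMeta (item : List (String × List (String × String))) : List (String × String) :=
  (PySem.Dict.mk item).getD "metadata" []

def pvTx (md : List (String × String)) : String :=
  PySem.Str.lower ((PySem.Dict.mk md).getD "transaction_type" "")

def pvIsSell (tx : String) : Bool := PySem.Str.isIn "sale" tx || PySem.Str.isIn "sell" tx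

def pvIsBuy (tx : String) : Bool := PySem.Str.isIn "buy" tx || PySem.Str.isIn "purchase" tx

def pvTicker (md : List (String × String)) : String :=
  (PySem.Dict.mk md).getD "ticker" "?"

-- ===== PORT A =====
def pvClassifyA (sb : List (List (String × String)) × List (List (String × String)))
    (item : List (String × List (String × String))) :
    List (List (String × String)) × List (List (String × String)) :=
  let md := pvMeta item
  let tx := pvTx md
  if pvIsSell tx then (sb.1 ++ [md], sb.2)
  else if pvIsBuy tx then (sb.1, sb.2 ++ [md])
  else sb

def pvCountStep (d : PySem.Dict String Int) (m : List (String × String)) : PySem.Dict String Int :=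
  let t := pvTicker m
  d.insert t (d.getD t 0 + 1)

def build_insider_section_py (items : List (List (String × List (String × String)))) : String :=
  let lines : List String := ["[INSIDER ALERT]"]
  let sb := items.foldl pvClassifyA ([], [])
  let sells := sb.1
  let buys := sb.2
  let lines := lines ++ ["Total: " ++ PySem.Int.toStr (items.length : Int) ++ " trades (Sells: "
    ++ PySem.Int.toStr (sells.length : Int) ++ ", Buys: " ++ PySem.Int.toStr (buys.length : Int) ++ ")"]
  let lines := if sells.isEmpty then lines else
    let sellsByTicker := sells.foldl pvCountStep PySem.Dict.empty
    (lines ++ ["Significant Sales:"]) ++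
      (PySem.List.sorted sellsByTicker.items (fun x => x.2) true).map
        (fun p => "  - " ++ p.1 ++ ": " ++ PySem.Int.toStr p.2 ++ " sell transaction(s)")
  let lines := if buys.isEmpty then lines else
    let buysByTicker := buys.foldl pvCountStep PySem.Dict.empty
    (lines ++ ["Notable Buys:"]) ++
      (PySem.List.sorted buysByTicker.items (fun x => x.2) true).map
        (fun p => "  - " ++ p.1 ++ ": " ++ PySem.Int.toStr p.2 ++ " buy transaction(s)")
  PySem.Str.join "\n" lines

-- ===== PORT B =====
def pvStepB (st : PySem.Dict String Int × PySem.Dict String Int × Int × Int)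
    (item : List (String × List (String × String))) :
    PySem.Dict String Int × PySem.Dict String Int × Int × Int :=
  let md := pvMeta item
  let tx := pvTx md
  if pvIsSell tx then
    let t := pvTicker md
    (st.1.insert t (st.1.getD t 0 + 1), st.2.1, st.2.2.1 + 1, st.2.2.2)
  else if pvIsBuy tx then
    let t := pvTicker md
    (st.1, st.2.1.insert t (st.2.1.getD t 0 + 1), st.2.2.1, st.2.2.2 + 1)
  else st

def pvSection (header : String) (word : String) (counts : PySem.Dict String Int) : List String :=
  if counts.items.isEmpty then [] else
    header :: (PySem.List.sorted counts.items (fun x => x.2) true).map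
      (fun p => "  - " ++ p.1 ++ ": " ++ PySem.Int.toStr p.2 ++ " " ++ word ++ " transaction(s)")

def build_insider_section_py_alt (items : List (List (String × List (String × String)))) : String :=
  let st := items.foldl pvStepB (PySem.Dict.empty, PySem.Dict.empty, 0, 0)
  let lines : List String := ["[INSIDER ALERT]",
    "Total: " ++ PySem.Int.toStr (items.length : Int) ++ " trades (Sells: "
      ++ PySem.Int.toStr st.2.2.1 ++ ", Buys: " ++ PySem.Int.toStr st.2.2.2 ++ ")"]
  PySem.Str.join "\n"
    (lines ++ pvSection "Significant Sales:" "sell" st.1 ++ pvSection "Notable Buys:" "buy" st.2.1)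

-- ===== PRECONDITION & SPEC =====
def Spec_build_insider_section_py (items : List (List (String × List (String × String)))) (out : String) : Prop := out = build_insider_section_py_alt items
instance (items : List (List (String × List (String × String)))) (out : String) : Decidable (Spec_build_insider_section_py items out) := by unfold Spec_build_insider_section_py; infer_instance

-- ===== CLAIM (what is proved, stated in full; the proofs are below) =====
def Claim_equal_build_insider_section_py : Prop := ∀ (items : List (List (String × List (String × String)))), Dom_build_insider_section_py items → Spec_build_insider_section_py items (build_insider_section_py items)

-- ===== LEMMAS AND PROOFS =====

-- B's fused loop equals A's two-phase computation: counters over the classified lists,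
-- lengths as the running totals.
theorem pvLoop_eq (items : List (List (String × List (String × String))))
    (s0 b0 : List (List (String × String))) :
    items.foldl pvStepB (s0.foldl pvCountStep PySem.Dict.empty,
      b0.foldl pvCountStep PySem.Dict.empty, (s0.length : Int), (b0.length : Int))
    = ((items.foldl pvClassifyA (s0, b0)).1.foldl pvCountStep PySem.Dict.empty,
       (items.foldl pvClassifyA (s0, b0)).2.foldl pvCountStep PySem.Dict.empty,
       ((items.foldl pvClassifyA (s0, b0)).1.length : Int),
       ((items.foldl pvClassifyA (s0, b0)).2.length : Int)) := by
  induction items generalizing s0 b0 with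
  | nil => simp
  | cons x l ih =>
    simp only [List.foldl_cons]
    by_cases hs : pvIsSell (pvTx (pvMeta x)) = true
    · have hA : pvClassifyA (s0, b0) x = (s0 ++ [pvMeta x], b0) := by
        simp [pvClassifyA, hs]
      have hB : pvStepB (s0.foldl pvCountStep PySem.Dict.empty,
            b0.foldl pvCountStep PySem.Dict.empty, (s0.length : Int), (b0.length : Int)) x
          = ((s0 ++ [pvMeta x]).foldl pvCountStep PySem.Dict.empty,
             b0.foldl pvCountStep PySem.Dict.empty,
             (((s0 ++ [pvMeta x]).length : Nat) : Int), (b0.length : Int)) := by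
        simp [pvStepB, hs, List.foldl_append, pvCountStep]
      rw [hB, hA]
      exact ih _ _
    · by_cases hb : pvIsBuy (pvTx (pvMeta x)) = true
      · have hA : pvClassifyA (s0, b0) x = (s0, b0 ++ [pvMeta x]) := by
          simp [pvClassifyA, hs, hb]
        have hB : pvStepB (s0.foldl pvCountStep PySem.Dict.empty,
              b0.foldl pvCountStep PySem.Dict.empty, (s0.length : Int), (b0.length : Int)) x
            = (s0.foldl pvCountStep PySem.Dict.empty,
               (b0 ++ [pvMeta x]).foldl pvCountStep PySem.Dict.empty,
               (s0.length : Int), (((b0 ++ [pvMeta x]).length : Nat) : Int)) := by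
          simp [pvStepB, hs, hb, List.foldl_append, pvCountStep]
        rw [hB, hA]
        exact ih _ _
      · have hA : pvClassifyA (s0, b0) x = (s0, b0) := by
          simp [pvClassifyA, hs, hb]
        have hB : pvStepB (s0.foldl pvCountStep PySem.Dict.empty,
              b0.foldl pvCountStep PySem.Dict.empty, (s0.length : Int), (b0.length : Int)) x
            = (s0.foldl pvCountStep PySem.Dict.empty,
               b0.foldl pvCountStep PySem.Dict.empty, (s0.length : Int), (b0.length : Int)) := by
          simp [pvStepB, hs, hb]
        rw [hB, hA]
        exact ih _ _

theorem pvCount_items_isEmpty (l : List (List (String × String))) :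
    ((l.foldl pvCountStep PySem.Dict.empty).items).isEmpty = l.isEmpty := by
  cases l with
  | nil => rfl
  | cons m t =>
    have aux : ∀ (u : List (List (String × String))) (d : PySem.Dict String Int),
        d.items ≠ [] → (u.foldl pvCountStep d).items ≠ [] := by
      intro u
      induction u with
      | nil => intro d h; exact h
      | cons y ys ih =>
        intro d h
        apply ih
        simp only [pvCountStep, PySem.Dict.items_insert]
        by_cases hc : d.contains (pvTicker y) = true <;> simp [hc, h]
    have h1 : ((pvCountStep PySem.Dict.empty m).items) ≠ [] := by
      simp [pvCountStep, PySem.Dict.items_insert]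
    simp only [List.foldl_cons, List.isEmpty_cons]
    have := aux t (pvCountStep PySem.Dict.empty m) h1
    simp [this]

-- ===== VERDICT (by name: the statement is the Claim_ definition above) =====
theorem build_insider_section_py_spec : Claim_equal_build_insider_section_py := by
  intro items _
  unfold Spec_build_insider_section_py build_insider_section_py build_insider_section_py_alt
  have hl := pvLoop_eq items [] []
  simp only [List.foldl_nil, List.length_nil, Nat.cast_zero] at hl
  rw [hl]
  simp only [pvSection]
  rw [pvCount_items_isEmpty, pvCount_items_isEmpty]
  cases hs : (items.foldl pvClassifyA ([], [])).1.isEmpty <;>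
    cases hb : (items.foldl pvClassifyA ([], [])).2.isEmpty <;>
      simp [List.append_assoc, String.append_assoc]
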